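-- pv_equiv track=rewrite | github.com/Tencent/fast-causal-inference | src/package_util/python/causal_inference/fast_causal_inference/dataframe/format.py | format_each_item
-- ===== SOURCE A (Python) =====
-- def format_each_item(content):
--     if isinstance(content, list):
--         content = content[0]
--     elif isinstance(content, str):
--         if content.startswith("["):
--             content = content[1:-1]
--     if not isinstance(content, (str, list, tuple)) or "p-value" not in content or "Coefficient" in content:
--         return None
--
--     is_xexpt_format = "recommend_samples" in content
--     content = content.split("\n")
--     content = [i.split() for i in content if i]
--     content = [i for i in content if i != [","]]
--     if is_xexpt_format == False:
--         head = content[0]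
--         content = [content[i] for i in range(len(content)) if i % 2 == 1]
--     else:
--         head = content[0] + content[3]
--         content = [content[i] for i in range(len(content)) if i % 5 != 0 and i % 5 != 3]
--         for i in range(0, len(content), 3):
--             content[i + 1] += content[i + 2]
--         content = [x for i, x in enumerate(content) if i % 3 != 2]
--
--     return head, [content]
-- ===== SOURCE B (Python) =====
-- def format_each_item(content):
--     if isinstance(content, list):
--         content = content[0]
--     elif isinstance(content, str):
--         if content.startswith("["):
--             content = content[1:-1]
--     if not isinstance(content, (str, list, tuple)) or "p-value" not in content or "Coefficient" in content:
--         return None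
--     toks = [line.split() for line in content.split("\n") if line]
--     toks = [t for t in toks if t != [","]]
--     if "recommend_samples" not in content:
--         head = toks[0]
--         rows = []
--         rest = toks
--         while len(rest) >= 2:
--             rows.append(rest[1])
--             rest = rest[2:]
--         return head, [rows]
--     head = toks[0] + toks[3]
--     rows = []
--     rest = toks
--     while len(rest) >= 5:
--         rows.append(rest[1])
--         rows.append(rest[2] + rest[4])
--         rest = rest[5:]
--     return head, [rows]
-- ===== Notes on version B (the rewrite author's own statement) =====
-- stated objective: simpler
-- what changed: B replaces A's three modular-index passes over the token rows (i%5-filter, an in-place += merge loop at stride 3, then an enumerate i%3-filter; i%2-filter in the non-xexpt branch) by one single chunked scan that consumes the row list 5 (resp. 2) rows at a time and emits each group's output directly.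
import Mathlib
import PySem

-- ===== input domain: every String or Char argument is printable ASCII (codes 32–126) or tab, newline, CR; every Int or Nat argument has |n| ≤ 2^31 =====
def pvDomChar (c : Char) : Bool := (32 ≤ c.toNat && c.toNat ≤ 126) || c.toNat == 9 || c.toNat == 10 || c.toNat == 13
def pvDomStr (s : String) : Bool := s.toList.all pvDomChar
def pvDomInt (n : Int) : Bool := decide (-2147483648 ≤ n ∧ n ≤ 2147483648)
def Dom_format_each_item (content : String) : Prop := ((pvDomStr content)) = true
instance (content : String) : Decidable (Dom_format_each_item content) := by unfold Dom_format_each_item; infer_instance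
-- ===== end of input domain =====

-- B replaces A's three modular-index passes over the token table by one single chunked scan (objective: simpler).

-- ===== PORT A =====
-- the for-i-in-range(0, len, 3) loop 'content[i+1] += content[i+2]'; pyGet? none = IndexError
def aLoop : List (List String) → List Int → Option (List (List String))
  | xs, [] => some xs
  | xs, i :: is =>
    match PySem.List.pyGet? xs (i + 1), PySem.List.pyGet? xs (i + 2) with
    | some y, some z => aLoop (xs.set (i + 1).toNat (y ++ z)) is   -- i ≥ 0 and in range here, so .toNat is exact
    | _, _ => none

def format_each_item (content : String) : Option (List String × List (List (List String))) :=
  let c := if PySem.Str.startswith content "[" then PySem.Str.slice content (some 1) (some (-1)) else content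
  if !(PySem.Str.isIn "p-value" c) || PySem.Str.isIn "Coefficient" c then none
  else
    let isX := PySem.Str.isIn "recommend_samples" c
    let lines := (PySem.Str.split? c "\n").getD []   -- sep "\n" ≠ "", so split? is always `some`: exact
    let toks0 := (lines.filter (fun l => !(l == ""))).map (fun l => PySem.Str.split₀ l)
    let toks := toks0.filter (fun t => !(t == [","]))
    if isX == false then
      match PySem.List.pyGet? toks 0 with
      | none => none   -- IndexError
      | some head =>
        some (head, [(PySem.List.pyRange 0 (PySem.List.len toks) 1).filterMap
          (fun i => if PySem.Int.mod i 2 == 1 then PySem.List.pyGet? toks i else none)])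
    else
      match PySem.List.pyGet? toks 0, PySem.List.pyGet? toks 3 with
      | some h0, some h3 =>
        let filtered := (PySem.List.pyRange 0 (PySem.List.len toks) 1).filterMap
          (fun i => if PySem.Int.mod i 5 != 0 && PySem.Int.mod i 5 != 3 then PySem.List.pyGet? toks i else none)
        match aLoop filtered (PySem.List.pyRange 0 (PySem.List.len filtered) 3) with
        | none => none   -- IndexError inside the += loop
        | some merged =>
          some (h0 ++ h3, [(PySem.List.enumerate merged).filterMap
            (fun p => if PySem.Int.mod p.1 3 != 2 then some p.2 else none)])
      | _, _ => none   -- IndexError computing head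

-- ===== PORT B =====
-- rows.append(rest[1]); rest = rest[2:]  while len(rest) >= 2
def bOdd : List (List String) → List (List String)
  | _ :: b :: rest => b :: bOdd rest
  | _ => []

-- rows.append(rest[1]); rows.append(rest[2] + rest[4]); rest = rest[5:]  while len(rest) >= 5
def bGroups : List (List String) → List (List String)
  | _ :: b :: c :: _ :: e :: rest => b :: (c ++ e) :: bGroups rest
  | _ => []

def format_each_item_alt (content : String) : Option (List String × List (List (List String))) :=
  let c := if PySem.Str.startswith content "[" then PySem.Str.slice content (some 1) (some (-1)) else content
  if !(PySem.Str.isIn "p-value" c) || PySem.Str.isIn "Coefficient" c then none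
  else
    let lines := (PySem.Str.split? c "\n").getD []   -- sep "\n" ≠ "", so split? is always `some`: exact
    let toks := ((lines.filter (fun l => !(l == ""))).map (fun l => PySem.Str.split₀ l)).filter
      (fun t => !(t == [","]))
    if !(PySem.Str.isIn "recommend_samples" c) then
      match PySem.List.pyGet? toks 0 with
      | none => none   -- IndexError
      | some head => some (head, [bOdd toks])
    else
      match PySem.List.pyGet? toks 0, PySem.List.pyGet? toks 3 with
      | some h0, some h3 => some (h0 ++ h3, [bGroups toks])
      | _, _ => none   -- IndexError computing head

-- ===== PRECONDITION & SPEC =====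
-- Pre_ excludes exactly the inputs on which Python A raises IndexError: xexpt-format tables whose
-- token-row count n is below 4 or misaligned (n % 5 ∉ {0, 1}), where A's indexing/merge loop overruns.
def Pre_format_each_item (content : String) : Prop :=
  let c := if PySem.Str.startswith content "[" then PySem.Str.slice content (some 1) (some (-1)) else content
  (PySem.Str.isIn "p-value" c = true ∧ PySem.Str.isIn "Coefficient" c = false ∧
      PySem.Str.isIn "recommend_samples" c = true) →
    (let n := (((((PySem.Str.split? c "\n").getD []).filter (fun l => !(l == ""))).map
        (fun l => PySem.Str.split₀ l)).filter (fun t => !(t == [","]))).length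
     4 ≤ n ∧ (n % 5 = 0 ∨ n % 5 = 1))
instance (content : String) : Decidable (Pre_format_each_item content) := by
  unfold Pre_format_each_item; infer_instance

def pvWitness_format_each_item : String := "p-value"

def Spec_format_each_item (content : String) (out : Option (List String × List (List (List String)))) :
    Prop := out = format_each_item_alt content
instance (content : String) (out : Option (List String × List (List (List String)))) :
    Decidable (Spec_format_each_item content out) := by unfold Spec_format_each_item; infer_instance

-- ===== CLAIM (what is proved, stated in full; the proofs are below) =====
def Claim_equal_format_each_item : Prop := ∀ (content : String), Dom_format_each_item content →
  Pre_format_each_item content → Spec_format_each_item content (format_each_item content)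

-- ===== LEMMAS AND PROOFS =====
theorem pyRange3_cons (a b : ℤ) (h : a < b) :
    PySem.List.pyRange a b 3 = a :: PySem.List.pyRange (a + 3) b 3 := by
  rw [PySem.List.pyRange_of_pos a b (by norm_num), PySem.List.pyRange_of_pos (a + 3) b (by norm_num)]
  by_cases h2 : a + 3 < b
  · rw [if_pos h, if_pos h2]
    have : ((b - a + 3 - 1) / 3).toNat = ((b - (a + 3) + 3 - 1) / 3).toNat + 1 := by omega
    rw [this, List.range_succ_eq_map]
    simp [List.map_map, Function.comp]
    intro k _; ring
  · rw [if_pos h, if_neg h2]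
    have : ((b - a + 3 - 1) / 3).toNat = 1 := by omega
    simp [this, List.range_succ]

theorem pyRange3_nil (a b : ℤ) (h : b ≤ a) : PySem.List.pyRange a b 3 = [] := by
  rw [PySem.List.pyRange_of_pos a b (by norm_num), if_neg (by omega)]; simp

-- A's '[xs[i] for i in range(len(xs)) if P i]' as a filter over enumerate
theorem filterRange_eq_enum (xs : List (List String)) (P : Int → Bool) :
    (PySem.List.pyRange 0 (PySem.List.len xs) 1).filterMap
        (fun i => if P i then PySem.List.pyGet? xs i else none) =
      (PySem.List.enumerate xs).filterMap (fun p => if P p.1 then some p.2 else none) := by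
  rw [PySem.List.enumerate_eq_map_pyRange xs [], List.filterMap_map]
  apply List.filterMap_congr
  intro i hi
  have hmem := (PySem.List.mem_pyRange_one).1 hi
  have hlt : i < (xs.length : ℤ) := by simpa [PySem.List.len] using hmem.2
  by_cases hp : P i = true
  · simp only [hp, if_true, Function.comp]
    have hi' : i = ((i.toNat : ℕ) : ℤ) := by omega
    rw [hi', PySem.List.pyGet?_ofNat xs i.toNat (by omega)]
    rw [← hi', PySem.List.pyGetD_eq_getElem xs [] hmem.1 hlt]
  · simp [hp, Function.comp]

-- proof-only selectors
def bOddAux : List (List String) → List (List String)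
  | [] => []
  | a :: r => a :: bOdd r

theorem bOdd_cons (a : List String) (r : List (List String)) : bOdd (a :: r) = bOddAux r := by
  cases r <;> rfl

def sel5 : Nat → List (List String) → List (List String)
  | _, [] => []
  | r, a :: xs => (if r ≠ 0 ∧ r ≠ 3 then [a] else []) ++ sel5 ((r + 1) % 5) xs

def sel3 : Nat → List (List String) → List (List String)
  | _, [] => []
  | r, a :: xs => (if r ≠ 2 then [a] else []) ++ sel3 ((r + 1) % 3) xs

def gMerge : List (List String) → List (List String)
  | x :: y :: z :: r => x :: (y ++ z) :: z :: gMerge r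
  | _ => []

theorem E2 (xs : List (List String)) : ∀ (s : ℤ), 0 ≤ s →
    (PySem.List.enumerate xs s).filterMap
        (fun p => if PySem.Int.mod p.1 2 == 1 then some p.2 else none) =
      if s % 2 = 1 then bOddAux xs else bOdd xs := by
  induction xs with
  | nil => intro s hs; rw [PySem.List.enumerate_nil]; simp; split <;> rfl
  | cons a r ih =>
    intro s hs
    rw [PySem.List.enumerate_cons, List.filterMap_cons]
    have hm : PySem.Int.mod s 2 = s % 2 := PySem.Int.mod_eq_emod_of_pos (by norm_num)
    have hrec := ih (s + 1) (by omega)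
    dsimp only
    rw [hm, hrec]
    by_cases hpar : s % 2 = 1
    · rw [if_pos (beq_iff_eq.mpr hpar), if_neg (by omega : ¬ (s + 1) % 2 = 1), if_pos hpar]
      rfl
    · rw [if_neg (by simpa using hpar), if_pos (by omega : (s + 1) % 2 = 1), if_neg hpar,
        bOdd_cons]

theorem E5 (xs : List (List String)) : ∀ (s : ℤ), 0 ≤ s →
    (PySem.List.enumerate xs s).filterMap
        (fun p => if PySem.Int.mod p.1 5 != 0 && PySem.Int.mod p.1 5 != 3 then some p.2 else none) =
      sel5 (s % 5).toNat xs := by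
  induction xs with
  | nil => intro s hs; rw [PySem.List.enumerate_nil]; simp [sel5]
  | cons a r ih =>
    intro s hs
    rw [PySem.List.enumerate_cons, List.filterMap_cons]
    have hm : PySem.Int.mod s 5 = s % 5 := PySem.Int.mod_eq_emod_of_pos (by norm_num)
    have hrec := ih (s + 1) (by omega)
    have hnat : ((s + 1) % 5).toNat = ((s % 5).toNat + 1) % 5 := by omega
    dsimp only
    rw [hm, hrec, hnat]
    simp only [sel5]
    by_cases hc : (s % 5).toNat ≠ 0 ∧ (s % 5).toNat ≠ 3
    · rw [if_pos (by simp only [Bool.and_eq_true, bne_iff_ne]; constructor <;> omega), if_pos hc]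
      rfl
    · rw [if_neg (by simp only [Bool.and_eq_true, bne_iff_ne]; intro hb; exact hc (by constructor <;> omega)),
        if_neg hc]
      simp

theorem E3 (xs : List (List String)) : ∀ (s : ℤ), 0 ≤ s →
    (PySem.List.enumerate xs s).filterMap
        (fun p => if PySem.Int.mod p.1 3 != 2 then some p.2 else none) =
      sel3 (s % 3).toNat xs := by
  induction xs with
  | nil => intro s hs; rw [PySem.List.enumerate_nil]; simp [sel3]
  | cons a r ih =>
    intro s hs
    rw [PySem.List.enumerate_cons, List.filterMap_cons]
    have hm : PySem.Int.mod s 3 = s % 3 := PySem.Int.mod_eq_emod_of_pos (by norm_num)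
    have hrec := ih (s + 1) (by omega)
    have hnat : ((s + 1) % 3).toNat = ((s % 3).toNat + 1) % 3 := by omega
    dsimp only
    rw [hm, hrec, hnat]
    simp only [sel3]
    by_cases hc : (s % 3).toNat ≠ 2
    · rw [if_pos (by simp only [bne_iff_ne]; omega), if_pos hc]
      rfl
    · rw [if_neg (by simp only [bne_iff_ne]; omega), if_neg hc]
      simp

theorem aLoop_spec : ∀ (k : ℕ) (pre xs : List (List String)), xs.length = 3 * k →
    aLoop (pre ++ xs) (PySem.List.pyRange (pre.length) (pre.length + 3 * k) 3) =
      some (pre ++ gMerge xs) := by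
  intro k
  induction k with
  | zero =>
    intro pre xs h
    have hx : xs = [] := List.eq_nil_of_length_eq_zero (by omega)
    subst hx
    rw [pyRange3_nil _ _ (by push_cast; omega)]
    simp [aLoop, gMerge]
  | succ k ih =>
    intro pre xs h
    rcases xs with _ | ⟨x, t1⟩
    · simp at h
    rcases t1 with _ | ⟨y, t2⟩
    · simp at h; omega
    rcases t2 with _ | ⟨z, r⟩
    · simp at h; omega
    have hr : r.length = 3 * k := by simp at h; omega
    rw [pyRange3_cons _ _ (by push_cast; omega)]
    simp only [aLoop]
    have e1 : ((pre.length : ℤ) + 1) = ((pre.length + 1 : ℕ) : ℤ) := by push_cast; ring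
    have e2 : ((pre.length : ℤ) + 2) = ((pre.length + 2 : ℕ) : ℤ) := by push_cast; ring
    rw [e1, e2, PySem.List.pyGet?_ofNat _ _ (by simp),
      PySem.List.pyGet?_ofNat _ _ (by simp)]
    have g1 : (pre ++ x :: y :: z :: r)[pre.length + 1]'(by simp) = y := by
      rw [List.getElem_append_right (by omega)]
      simp
    have g2 : (pre ++ x :: y :: z :: r)[pre.length + 2]'(by simp) = z := by
      rw [List.getElem_append_right (by omega)]
      simp
    rw [g1, g2]
    dsimp only
    have e3 : (((pre.length + 1 : ℕ) : ℤ)).toNat = pre.length + 1 := by omega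
    rw [e3, List.set_append, if_neg (by omega)]
    have e4 : (x :: y :: z :: r).set (pre.length + 1 - pre.length) (y ++ z) =
        x :: (y ++ z) :: z :: r := by
      have : pre.length + 1 - pre.length = 1 := by omega
      rw [this]
      rfl
    rw [e4]
    have hass : pre ++ x :: (y ++ z) :: z :: r = (pre ++ [x, y ++ z, z]) ++ r := by simp
    rw [hass]
    have harg : (((pre ++ [x, y ++ z, z]).length : ℤ)) = (pre.length : ℤ) + 3 := by
      simp
    have hih := ih (pre ++ [x, y ++ z, z]) r hr
    rw [harg] at hih
    have harg2 : ((pre.length : ℤ) + 3) + 3 * (k : ℤ) = (pre.length : ℤ) + 3 * ((k : ℤ) + 1) := by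
      ring
    rw [harg2] at hih
    have hfin : (pre ++ [x, y ++ z, z]) ++ gMerge r = pre ++ gMerge (x :: y :: z :: r) := by
      simp [gMerge]
    rw [hfin] at hih
    push_cast at hih ⊢
    exact hih

theorem chunk5 : ∀ (n : ℕ) (xs : List (List String)), xs.length ≤ n →
    (xs.length % 5 = 0 ∨ xs.length % 5 = 1) →
    (∃ k, (sel5 0 xs).length = 3 * k) ∧ sel3 0 (gMerge (sel5 0 xs)) = bGroups xs := by
  intro n
  induction n with
  | zero =>
    intro xs h hm
    have hx : xs = [] := List.eq_nil_of_length_eq_zero (by omega)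
    subst hx
    exact ⟨⟨0, rfl⟩, rfl⟩
  | succ n ih =>
    intro xs h hm
    rcases xs with _ | ⟨a, t1⟩
    · exact ⟨⟨0, rfl⟩, rfl⟩
    rcases t1 with _ | ⟨b, t2⟩
    · refine ⟨⟨0, ?_⟩, ?_⟩ <;> simp [sel5, sel3, gMerge, bGroups]
    rcases t2 with _ | ⟨c, t3⟩
    · simp at hm
    rcases t3 with _ | ⟨d, t4⟩
    · simp at hm
    rcases t4 with _ | ⟨e, r⟩
    · simp at hm
    have h5 : sel5 0 (a :: b :: c :: d :: e :: r) = b :: c :: e :: sel5 0 r := by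
      simp [sel5]
    obtain ⟨⟨k, hk⟩, hx⟩ := ih r (by simp at h; omega) (by simp at hm ⊢; omega)
    constructor
    · refine ⟨k + 1, ?_⟩
      simp [h5, hk]
      ring
    · rw [h5]
      simp only [gMerge, sel3]
      simp [hx, bGroups]

-- ===== VERDICT (by name: the statement is the Claim_ definition above) =====
set_option maxHeartbeats 2000000 in
theorem format_each_item_spec : Claim_equal_format_each_item := by
  intro content hdom hpre
  unfold Spec_format_each_item format_each_item format_each_item_alt
  unfold Pre_format_each_item at hpre
  dsimp only at hpre ⊢
  set c := if PySem.Str.startswith content "[" then PySem.Str.slice content (some 1) (some (-1))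
    else content with hc
  by_cases hg : (!(PySem.Str.isIn "p-value" c) || PySem.Str.isIn "Coefficient" c) = true
  · rw [if_pos hg, if_pos hg]
  · rw [if_neg hg, if_neg hg]
    simp only [Bool.not_eq_true, Bool.or_eq_false_iff, Bool.not_eq_false'] at hg
    obtain ⟨hp, hco⟩ := hg
    set toks := ((((PySem.Str.split? c "
").getD []).filter (fun l => !(l == ""))).map
      (fun l => PySem.Str.split₀ l)).filter (fun t => !(t == [","])) with htoks
    cases hx : PySem.Str.isIn "recommend_samples" c
    · rw [if_pos (by decide : ((false == false) : Bool) = true),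
        if_pos (by decide : (!false) = true)]
      cases h0 : PySem.List.pyGet? toks 0
      · rfl
      · rw [filterRange_eq_enum toks (fun i => PySem.Int.mod i 2 == 1), E2 toks 0 le_rfl,
          if_neg (by norm_num : ¬ ((0 : ℤ) % 2 = 1))]
    · rw [if_neg (by decide : ¬ ((true == false) : Bool) = true),
        if_neg (by decide : ¬ (!true) = true)]
      have hn := hpre ⟨hp, hco, hx⟩
      cases h0 : PySem.List.pyGet? toks 0
      · rfl
      · cases h3 : PySem.List.pyGet? toks 3
        · rfl
        · rw [filterRange_eq_enum toks
            (fun i => PySem.Int.mod i 5 != 0 && PySem.Int.mod i 5 != 3), E5 toks 0 le_rfl,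
            show (((0 : ℤ) % 5).toNat) = 0 from by norm_num]
          obtain ⟨⟨k, hk⟩, hxx⟩ := chunk5 toks.length toks le_rfl hn.2
          have hal := aLoop_spec k [] (sel5 0 toks) hk
          simp only [List.nil_append, List.length_nil, Nat.cast_zero, zero_add] at hal
          have hz : PySem.List.len (sel5 0 toks) = 3 * (k : ℤ) := by
            simp only [PySem.List.len, hk]
            push_cast
            ring
          rw [hz, hal]
          dsimp only
          rw [E3 (gMerge (sel5 0 toks)) 0 le_rfl,
            show (((0 : ℤ) % 3).toNat) = 0 from by norm_num, hxx]
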